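-- pv_equiv track=rewrite | github.com/RenaudDeCraon/CS333 | box.py | findNestedBox
-- ===== SOURCE A (Python) =====
-- def box_fits_inside(outer,inner):
--     return all(outer_dim > inner_dim for outer_dim, inner_dim in zip(outer, inner))
--
-- def findNestedBox(boxDimensions):
--     max_nested_count =0
--     max_nested_indices = []
--     n = len(boxDimensions)
--     dp = [1] * n
--     for i in range(0, n):
--         for j in range(i):
--             if box_fits_inside(boxDimensions[i], boxDimensions[j]) and dp[i] < dp[j] + 1:
--                 dp[i] = dp[j] + 1
--
--         if dp[i] > max_nested_count:
--             max_nested_count = dp[i]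
--             max_nested_indices.append(i)
--         elif dp[i] == max_nested_count:
--             max_nested_indices.append(i)
--
--     return max_nested_count, max_nested_indices
-- ===== SOURCE B (Python) =====
-- def box_fits_inside(outer, inner):
--     return all(outer_dim > inner_dim for outer_dim, inner_dim in zip(outer, inner))
--
-- def findNestedBox(boxDimensions):
--     n = len(boxDimensions)
--     memo = {}
--
--     def best(i):
--         if i not in memo:
--             memo[i] = 1 + max(
--                 (best(j) for j in range(i)
--                  if box_fits_inside(boxDimensions[i], boxDimensions[j])),
--                 default=0)
--         return memo[i]
--
--     dp = [best(i) for i in range(n)]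
--     max_nested_count = 0
--     max_nested_indices = []
--     for i, v in enumerate(dp):
--         if v >= max_nested_count:
--             max_nested_count = v
--             max_nested_indices.append(i)
--     return max_nested_count, max_nested_indices
-- ===== Notes on version B (the rewrite author's own statement) =====
-- stated objective: alternative
-- what changed: Replaces A's in-place dp array updated by a nested forward loop with a memoized recursive helper best(i) computed top-down, followed by a single separate selection pass that uses one >= comparison instead of A's two-branch running-max bookkeeping.
import Mathlib
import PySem

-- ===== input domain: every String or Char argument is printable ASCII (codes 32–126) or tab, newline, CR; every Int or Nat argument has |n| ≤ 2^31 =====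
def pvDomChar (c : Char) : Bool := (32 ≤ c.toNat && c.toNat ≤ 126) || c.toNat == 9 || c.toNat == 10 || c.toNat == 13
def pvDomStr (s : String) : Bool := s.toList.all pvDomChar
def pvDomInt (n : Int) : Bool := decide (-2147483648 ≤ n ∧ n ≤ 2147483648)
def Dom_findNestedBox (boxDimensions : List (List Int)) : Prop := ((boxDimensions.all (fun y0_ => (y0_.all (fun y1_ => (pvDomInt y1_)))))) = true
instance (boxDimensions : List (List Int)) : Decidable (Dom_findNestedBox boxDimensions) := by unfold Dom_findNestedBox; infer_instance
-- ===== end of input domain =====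

-- B replaces A's in-place dp array (nested forward loops) by a memoized top-down recursion plus a separate single-branch selection pass; same results, same asymptotic cost.


-- ===== PORT A =====
-- box_fits_inside(outer, inner): all(outer_dim > inner_dim for ... in zip(outer, inner))
def boxFits (outer inner : List Int) : Bool :=
  (outer.zip inner).all (fun p => decide (p.2 < p.1))

-- boxDimensions[i] / dp[i]: indices produced by range() are always in range here, so the
-- defaulted pyGetD is exact.
def pvGetL (xs : List (List Int)) (i : Int) : List Int := PySem.List.pyGetD xs i []
def pvGetI (xs : List Int) (i : Int) : Int := PySem.List.pyGetD xs i 0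

-- the inner 'for j in range(i)' body
def stepInnerA (bd : List (List Int)) (i : Int) (dp : List Int) (j : Int) : List Int :=
  if boxFits (pvGetL bd i) (pvGetL bd j) && decide (pvGetI dp i < pvGetI dp j + 1) then
    PySem.List.pySetD dp i (pvGetI dp j + 1)
  else dp

-- the outer 'for i in range(0, n)' body; state = (dp, max_nested_count, max_nested_indices)
def stepOuterA (bd : List (List Int)) (st : List Int × Int × List Int) (i : Int) :
    List Int × Int × List Int :=
  let dp := (PySem.List.pyRange 0 i 1).foldl (stepInnerA bd i) st.1
  if pvGetI dp i > st.2.1 then (dp, pvGetI dp i, st.2.2 ++ [i])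
  else if pvGetI dp i = st.2.1 then (dp, st.2.1, st.2.2 ++ [i])
  else (dp, st.2.1, st.2.2)

def findNestedBox (boxDimensions : List (List Int)) : Int × List Int :=
  let n := boxDimensions.length
  let r := (PySem.List.pyRange 0 (n : Int) 1).foldl (stepOuterA boxDimensions)
      (List.replicate n 1, 0, [])
  (r.2.1, r.2.2)

-- ===== PORT B =====
-- best(i) = 1 + max((best(j) for j in range(i) if fits), default=0); all values are ≥ 1,
-- so max(gen, default=0) is exactly a max-fold started at 0.
def bestB (bd : List (List Int)) (i : Nat) : Int :=
  1 + (List.range i).attach.foldl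
      (fun m j =>
        if boxFits (bd.getD i []) (bd.getD j.1 []) then max m (bestB bd j.1) else m) 0
termination_by i
decreasing_by exact List.mem_range.mp j.2

def findNestedBox_alt (boxDimensions : List (List Int)) : Int × List Int :=
  let n := boxDimensions.length
  let dp := (List.range n).map (bestB boxDimensions)
  (List.range n).foldl
    (fun st i => if dp.getD i 0 ≥ st.1 then (dp.getD i 0, st.2 ++ [(i : Int)]) else st)
    ((0 : Int), ([] : List Int))

-- ===== PRECONDITION & SPEC =====
def Spec_findNestedBox (boxDimensions : List (List Int)) (out : Int × List Int) : Prop := out = findNestedBox_alt boxDimensions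
instance (boxDimensions : List (List Int)) (out : Int × List Int) : Decidable (Spec_findNestedBox boxDimensions out) := by unfold Spec_findNestedBox; infer_instance

-- ===== CLAIM (what is proved, stated in full; the proofs are below) =====
def Claim_equal_findNestedBox : Prop := ∀ (boxDimensions : List (List Int)), Dom_findNestedBox boxDimensions → Spec_findNestedBox boxDimensions (findNestedBox boxDimensions)

-- ===== LEMMAS AND PROOFS =====

-- proof-only helpers: A's dp after the first m outer iterations, the inner max-accumulator,
-- and the (count, indices) selection state after m iterations in A's branch shape.
theorem set_map_range {α : Type} (f : Nat → α) (n i : Nat) (v : α) :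
    ((List.range n).map f).set i v = (List.range n).map (fun k => if k = i then v else f k) := by
  refine List.ext_getElem (by simp) ?_
  intro k h1 h2
  simp only [List.getElem_set, List.getElem_map, List.getElem_range]
  split
  · next he => simp [he.symm]
  · next he => rw [if_neg (fun h => he h.symm)]

def accB (bd : List (List Int)) (i t : Nat) : Int :=
  (List.range t).foldl
    (fun m j => if boxFits (bd.getD i []) (bd.getD j []) then max m (bestB bd j) else m) 0

def dpFun (bd : List (List Int)) (m : Nat) : List Int :=
  (List.range bd.length).map (fun k => if k < m then bestB bd k else 1)

def selA (bd : List (List Int)) (m : Nat) : Int × List Int :=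
  (List.range m).foldl
    (fun st k =>
      if bestB bd k > st.1 then (bestB bd k, st.2 ++ [(k : Int)])
      else if bestB bd k = st.1 then (st.1, st.2 ++ [(k : Int)]) else st)
    (0, [])

theorem bestB_eq (bd : List (List Int)) (i : Nat) : bestB bd i = 1 + accB bd i i := by
  rw [bestB, accB]
  exact congrArg (1 + ·) (List.foldl_attach
    (l := List.range i)
    (f := fun m j => if boxFits (bd.getD i []) (bd.getD j []) then max m (bestB bd j) else m)
    (b := 0))

theorem innerA_eq (bd : List (List Int)) (i : Nat) (hi : i < bd.length) :
    ∀ t : Nat, t ≤ i →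
      (PySem.List.pyRange 0 (t : Int) 1).foldl (stepInnerA bd (i : Int)) (dpFun bd i) =
        (List.range bd.length).map
          (fun k => if k = i then 1 + accB bd i t else if k < i then bestB bd k else 1) := by
  intro t ht
  induction t with
  | zero =>
    rw [Nat.cast_zero, PySem.List.pyRange_one_eq_nil le_rfl, List.foldl_nil, dpFun]
    refine List.map_congr_left ?_
    intro k _
    by_cases hk : k = i
    · subst hk; simp [accB]
    · simp [hk]
  | succ t ih =>
    have ht' : t ≤ i := Nat.le_of_succ_le ht
    have htlt : t < i := ht
    rw [Nat.cast_succ, PySem.List.pyRange_one_succ_right (by positivity), List.foldl_append,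
      ih ht', List.foldl_cons, List.foldl_nil]
    have hgi : pvGetI ((List.range bd.length).map
        (fun k => if k = i then 1 + accB bd i t else if k < i then bestB bd k else 1)) (i : Int)
        = 1 + accB bd i t := by
      rw [pvGetI, PySem.List.pyGetD_natCast, PySem.List.getD_map_range _ _ _ _ hi]
      simp
    have hgt : pvGetI ((List.range bd.length).map
        (fun k => if k = i then 1 + accB bd i t else if k < i then bestB bd k else 1)) (t : Int)
        = bestB bd t := by
      rw [pvGetI, PySem.List.pyGetD_natCast,
        PySem.List.getD_map_range _ _ _ _ (Nat.lt_trans htlt hi)]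
      simp [Nat.ne_of_lt htlt, htlt]
    have hacc : accB bd i (t + 1) =
        if boxFits (bd.getD i []) (bd.getD t []) then max (accB bd i t) (bestB bd t)
        else accB bd i t := by
      rw [accB, List.range_succ, List.foldl_append, List.foldl_cons, List.foldl_nil, ← accB]
    rw [stepInnerA, hgi, hgt]
    have hL : pvGetL bd (i : Int) = bd.getD i [] := by
      rw [pvGetL, PySem.List.pyGetD_natCast]
    have hLt : pvGetL bd (t : Int) = bd.getD t [] := by
      rw [pvGetL, PySem.List.pyGetD_natCast]
    rw [hL, hLt]
    by_cases hf : boxFits (bd.getD i []) (bd.getD t []) = true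
    · by_cases hlt : accB bd i t < bestB bd t
      · have hc : (true && decide (1 + accB bd i t < bestB bd t + 1)) = true := by
          simp; omega
        rw [hf, hc, if_pos rfl, PySem.List.pySetD_natCast, set_map_range _ _ _ _]
        refine List.map_congr_left ?_
        intro k _
        by_cases hk : k = i
        · subst hk
          rw [if_pos rfl, if_pos rfl, hacc, if_pos hf, max_eq_right (le_of_lt hlt)]
          omega
        · simp [hk]
      · have hc : (true && decide (1 + accB bd i t < bestB bd t + 1)) = false := by
          simp; omega
        rw [hf, hc, if_neg (by simp)]
        refine List.map_congr_left ?_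
        intro k _
        by_cases hk : k = i
        · subst hk
          rw [if_pos rfl, if_pos rfl, hacc, if_pos hf, max_eq_left (not_lt.mp hlt)]
        · simp [hk]
    · have hf' : boxFits (bd.getD i []) (bd.getD t []) = false := eq_false_of_ne_true hf
      rw [hf', if_neg (by simp)]
      refine List.map_congr_left ?_
      intro k _
      by_cases hk : k = i
      · subst hk
        rw [if_pos rfl, if_pos rfl, hacc, if_neg (by rw [hf']; simp)]
      · simp [hk]

theorem outerA_eq (bd : List (List Int)) :
    ∀ m : Nat, m ≤ bd.length →
      (PySem.List.pyRange 0 (m : Int) 1).foldl (stepOuterA bd)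
          (List.replicate bd.length 1, 0, []) =
        (dpFun bd m, selA bd m) := by
  intro m hm
  induction m with
  | zero =>
    rw [Nat.cast_zero, PySem.List.pyRange_one_eq_nil le_rfl, List.foldl_nil]
    refine Prod.ext ?_ rfl
    rw [dpFun]
    refine List.ext_getElem (by simp) ?_
    intro k h1 h2
    simp
  | succ m ih =>
    have hm' : m ≤ bd.length := Nat.le_of_succ_le hm
    have hmlt : m < bd.length := hm
    rw [Nat.cast_succ, PySem.List.pyRange_one_succ_right (by positivity), List.foldl_append,
      ih hm', List.foldl_cons, List.foldl_nil, stepOuterA]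
    have hdp : (PySem.List.pyRange 0 (m : Int) 1).foldl (stepInnerA bd (m : Int)) (dpFun bd m)
        = dpFun bd (m + 1) := by
      rw [innerA_eq bd m hmlt m le_rfl, dpFun]
      refine List.map_congr_left ?_
      intro k _
      by_cases hk : k = m
      · subst hk; simp [← bestB_eq]
      · by_cases hk2 : k < m
        · simp [hk, hk2, Nat.lt_succ_of_lt hk2]
        · have : ¬ k < m + 1 := by omega
          simp [hk, hk2, this]
    have hv : pvGetI (dpFun bd (m + 1)) (m : Int) = bestB bd m := by
      rw [dpFun, pvGetI, PySem.List.pyGetD_natCast, PySem.List.getD_map_range _ _ _ _ hmlt]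
      simp
    have hsel : selA bd (m + 1) =
        if bestB bd m > (selA bd m).1 then (bestB bd m, (selA bd m).2 ++ [(m : Int)])
        else if bestB bd m = (selA bd m).1 then ((selA bd m).1, (selA bd m).2 ++ [(m : Int)])
        else selA bd m := by
      rw [selA, List.range_succ, List.foldl_append, List.foldl_cons, List.foldl_nil, ← selA]
    simp only [hdp, hv, hsel]
    split_ifs <;> rfl

theorem altB_eq (bd : List (List Int)) : findNestedBox_alt bd = selA bd bd.length := by
  rw [findNestedBox_alt, selA]
  refine PySem.List.foldl_congr_mem _ _ _ _ ?_
  intro st k hk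
  have hk' : k < bd.length := List.mem_range.mp hk
  rw [PySem.List.getD_map_range _ _ _ _ hk']
  by_cases h1 : bestB bd k > st.1
  · rw [if_pos (le_of_lt h1), if_pos h1]
  · by_cases h2 : bestB bd k = st.1
    · rw [if_pos (le_of_eq h2.symm), if_neg h1, if_pos h2, h2]
    · rw [if_neg (by omega), if_neg h1, if_neg h2]

-- ===== VERDICT (by name: the statement is the Claim_ definition above) =====
theorem findNestedBox_spec : Claim_equal_findNestedBox := by
  intro bd _
  unfold Spec_findNestedBox
  rw [altB_eq, findNestedBox]
  simp only [outerA_eq bd bd.length le_rfl]
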